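-- pv_equiv track=rewrite | github.com/rickytang666/prospector | discord_bot/cogs/explain_match.py | _find_in_cache
-- ===== SOURCE A (Python) =====
-- def _find_in_cache(candidates: list, name: str) -> dict | None:
--     name_lower = name.lower()
--     # exact match first
--     for c in candidates:
--         if c.get("name", "").lower() == name_lower:
--             return c
--     # fallback: substring
--     for c in candidates:
--         if name_lower in c.get("name", "").lower():
--             return c
--     return None
-- ===== SOURCE B (Python) =====
-- def _find_in_cache(candidates: list, name: str) -> dict | None:
--     """Single pass: exact match returns immediately; first substring match is kept as fallback."""
--     name_lower = name.lower()
--     fallback = None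
--     for c in candidates:
--         cl = c.get("name", "").lower()
--         if cl == name_lower:
--             return c
--         if fallback is None and name_lower in cl:
--             fallback = c
--     return fallback
-- ===== Notes on version B (the rewrite author's own statement) =====
-- stated objective: alternative
-- what changed: Fuses A's two sequential scans (exact, then substring) into one pass that returns an exact match immediately and remembers the first substring match as a fallback, lowering each candidate name only once.
import Mathlib
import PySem

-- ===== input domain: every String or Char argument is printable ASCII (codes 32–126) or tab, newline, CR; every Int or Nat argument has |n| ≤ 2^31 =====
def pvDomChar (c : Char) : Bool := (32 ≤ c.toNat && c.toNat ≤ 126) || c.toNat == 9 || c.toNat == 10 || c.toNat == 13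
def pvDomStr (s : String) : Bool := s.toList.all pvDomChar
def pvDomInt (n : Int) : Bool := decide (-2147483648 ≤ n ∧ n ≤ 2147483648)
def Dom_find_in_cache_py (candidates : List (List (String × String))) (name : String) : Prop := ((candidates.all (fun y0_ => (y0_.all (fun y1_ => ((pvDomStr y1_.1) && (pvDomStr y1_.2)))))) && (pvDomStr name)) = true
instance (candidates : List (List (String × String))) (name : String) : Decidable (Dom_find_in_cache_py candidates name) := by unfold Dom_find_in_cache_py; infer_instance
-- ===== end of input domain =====

-- B fuses A's two scans into one pass with a remembered first substring match (objective: alternative decomposition; same O(n) cost).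

-- ===== PORT A =====
-- first loop of A: exact match on lowered names
def pvA_exactLoop (nameLower : String) : List (List (String × String)) → Option (List (String × String))
  | [] => none
  | c :: rest =>
    if PySem.Str.lower (PySem.Dict.getD (PySem.Dict.mk c) "name" "") == nameLower then some c
    else pvA_exactLoop nameLower rest

-- second loop of A: substring match
def pvA_subLoop (nameLower : String) : List (List (String × String)) → Option (List (String × String))
  | [] => none
  | c :: rest =>
    if PySem.Str.isIn nameLower (PySem.Str.lower (PySem.Dict.getD (PySem.Dict.mk c) "name" "")) then some c
    else pvA_subLoop nameLower rest

def find_in_cache_py (candidates : List (List (String × String))) (name : String) : Option (List (String × String)) :=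
  let nameLower := PySem.Str.lower name
  match pvA_exactLoop nameLower candidates with
  | some c => some c
  | none => pvA_subLoop nameLower candidates

-- ===== PORT B =====
-- single pass: exact match returns immediately, first substring match is kept as fallback
def pvB_loop (nameLower : String) (fallback : Option (List (String × String))) :
    List (List (String × String)) → Option (List (String × String))
  | [] => fallback
  | c :: rest =>
    let cl := PySem.Str.lower (PySem.Dict.getD (PySem.Dict.mk c) "name" "")
    if cl == nameLower then some c
    else if fallback == none && PySem.Str.isIn nameLower cl then pvB_loop nameLower (some c) rest
    else pvB_loop nameLower fallback rest

def find_in_cache_py_alt (candidates : List (List (String × String))) (name : String) : Option (List (String × String)) :=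
  pvB_loop (PySem.Str.lower name) none candidates

-- ===== PRECONDITION & SPEC =====
def Spec_find_in_cache_py (candidates : List (List (String × String))) (name : String) (out : Option (List (String × String))) : Prop := out = find_in_cache_py_alt candidates name
instance (candidates : List (List (String × String))) (name : String) (out : Option (List (String × String))) : Decidable (Spec_find_in_cache_py candidates name out) := by unfold Spec_find_in_cache_py; infer_instance

-- ===== CLAIM (what is proved, stated in full; the proofs are below) =====
def Claim_equal_find_in_cache_py : Prop := ∀ (candidates : List (List (String × String))) (name : String), Dom_find_in_cache_py candidates name → Spec_find_in_cache_py candidates name (find_in_cache_py candidates name)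

-- ===== LEMMAS AND PROOFS =====

-- invariant of B's single loop, stated against A's two loops
theorem pvB_loop_eq (nameLower : String) (fb : Option (List (String × String)))
    (cs : List (List (String × String))) :
    pvB_loop nameLower fb cs =
      match pvA_exactLoop nameLower cs with
      | some c => some c
      | none => match fb with
        | some f => some f
        | none => pvA_subLoop nameLower cs := by
  induction cs generalizing fb with
  | nil => cases fb <;> simp [pvB_loop, pvA_exactLoop, pvA_subLoop]
  | cons c rest ih =>
    simp only [pvB_loop, pvA_exactLoop, pvA_subLoop]
    by_cases hx : PySem.Str.lower (PySem.Dict.getD (PySem.Dict.mk c) "name" "") == nameLower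
    · simp [hx]
    · simp only [hx, if_false, Bool.false_eq_true]
      by_cases hs : PySem.Str.isIn nameLower (PySem.Str.lower (PySem.Dict.getD (PySem.Dict.mk c) "name" ""))
      all_goals simp only [PySem.Str.isIn, PySem.Str.toList_lower] at hs
      · cases fb <;> simp [hs, ih] <;> cases pvA_exactLoop nameLower rest <;> simp
      · cases fb <;> simp [hs, ih]

-- ===== VERDICT (by name: the statement is the Claim_ definition above) =====
theorem find_in_cache_py_spec : Claim_equal_find_in_cache_py := by
  intro candidates name _
  unfold Spec_find_in_cache_py find_in_cache_py find_in_cache_py_alt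
  rw [pvB_loop_eq]
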